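-- pv_equiv track=rewrite | github.com/Mhaidar117/Surgical_Gestures | pipeline/export_ablation_analysis.py | normalize_statuses
-- ===== SOURCE A (Python) =====
-- from typing import Dict, Iterable, List, Tuple
--
-- def status_priority(status: str) -> int:
--     if status == "completed":
--         return 3
--     if status.startswith("skipped_"):
--         return 2
--     return 1
--
-- def normalize_statuses(rows: List[Dict]) -> List[Dict]:
--     deduped: Dict[Tuple[str, str, str, str], Dict] = {}
--
--     for row in rows:
--         key = (
--             str(row.get("condition", "")),
--             str(row.get("task", "")),
--             str(row.get("fold", "")),
--             str(row.get("stage", "")),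
--         )
--         current = deduped.get(key)
--         if current is None:
--             deduped[key] = row
--             continue
--
--         current_status = str(current.get("status", ""))
--         candidate_status = str(row.get("status", ""))
--         if status_priority(candidate_status) > status_priority(current_status):
--             deduped[key] = row
--             continue
--
--         if status_priority(candidate_status) == status_priority(current_status):
--             current_timestamp = str(current.get("timestamp", ""))
--             candidate_timestamp = str(row.get("timestamp", ""))
--             if candidate_timestamp >= current_timestamp:
--                 deduped[key] = row
--
--     return list(deduped.values())
-- ===== SOURCE B (Python) =====
-- from typing import Dict, Iterable, List, Tuple
--
-- def status_priority(status: str) -> int: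
--     if status == "completed":
--         return 3
--     if status.startswith("skipped_"):
--         return 2
--     return 1
--
-- def _better(row: Dict, best: Dict) -> bool:
--     p = status_priority(str(row.get("status", "")))
--     bp = status_priority(str(best.get("status", "")))
--     return p > bp or (p == bp and str(row.get("timestamp", "")) >= str(best.get("timestamp", "")))
--
-- def normalize_statuses(rows: List[Dict]) -> List[Dict]:
--     groups: Dict[Tuple[str, str, str, str], List[Dict]] = {}
--     for row in rows:
--         key = (
--             str(row.get("condition", "")),
--             str(row.get("task", "")),
--             str(row.get("fold", "")),
--             str(row.get("stage", "")),
--         )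
--         groups.setdefault(key, []).append(row)
--
--     out: List[Dict] = []
--     for group in groups.values():
--         best = group[0]
--         for row in group[1:]:
--             if _better(row, best):
--                 best = row
--         out.append(best)
--     return out
-- ===== Notes on version B (the rewrite author's own statement) =====
-- stated objective: alternative
-- what changed: A dedups in a single pass, comparing each row against the dict's current winner and overwriting in place; B first groups all rows per key (setdefault/append), then in a second pass reduces each group to its winner with a small best-so-far loop.
import Mathlib
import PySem

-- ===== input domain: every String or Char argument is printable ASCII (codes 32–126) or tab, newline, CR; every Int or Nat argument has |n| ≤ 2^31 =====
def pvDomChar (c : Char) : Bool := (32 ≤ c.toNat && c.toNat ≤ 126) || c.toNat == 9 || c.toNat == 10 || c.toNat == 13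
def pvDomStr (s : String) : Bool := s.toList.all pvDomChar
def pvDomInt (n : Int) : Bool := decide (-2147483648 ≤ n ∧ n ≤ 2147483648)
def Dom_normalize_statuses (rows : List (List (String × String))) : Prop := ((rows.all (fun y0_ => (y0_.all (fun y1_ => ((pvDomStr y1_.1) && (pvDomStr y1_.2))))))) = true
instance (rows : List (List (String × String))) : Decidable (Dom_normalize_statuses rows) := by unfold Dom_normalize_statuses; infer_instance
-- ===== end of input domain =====

-- B replaces A's single-pass "compare against the dict's current winner" loop by a
-- group-then-reduce decomposition (first pass groups rows per key, second pass picks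
-- each group's winner); objective: alternative decomposition, same cost.

-- ===== PORT A =====
-- status_priority (identical helper in both Pythons)
def pvPrio (status : String) : Int :=
  if status = "completed" then 3
  else if PySem.Str.startswith status "skipped_" then 2
  else 1

-- row.get(k, "") on a row (a Python dict, here an association list)
def pvGet (row : List (String × String)) (k : String) : String :=
  (PySem.Dict.mk row).getD k ""

-- the dedup key (str(...) of a string is the string itself)
def pvKey (row : List (String × String)) : String × String × String × String :=
  (pvGet row "condition", pvGet row "task", pvGet row "fold", pvGet row "stage")

-- body of A's for-loop
def pvStepA (d : PySem.Dict (String × String × String × String) (List (String × String)))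
    (row : List (String × String)) :
    PySem.Dict (String × String × String × String) (List (String × String)) :=
  let key := pvKey row
  match d.get? key with
  | none => d.insert key row
  | some current =>
    let current_status := pvGet current "status"
    let candidate_status := pvGet row "status"
    if pvPrio candidate_status > pvPrio current_status then d.insert key row
    else if pvPrio candidate_status = pvPrio current_status then
      -- candidate_timestamp >= current_timestamp
      if pvGet current "timestamp" ≤ pvGet row "timestamp" then d.insert key row else d
    else d

def normalize_statuses (rows : List (List (String × String))) : List (List (String × String)) :=
  (rows.foldl pvStepA PySem.Dict.empty).values

-- ===== PORT B =====
-- _better(row, best) from Source B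
def pvBetter (row best : List (String × String)) : Bool :=
  let p := pvPrio (pvGet row "status")
  let bp := pvPrio (pvGet best "status")
  decide (p > bp) || (decide (p = bp) && decide (pvGet best "timestamp" ≤ pvGet row "timestamp"))

-- B's second-pass inner loop: best = group[0]; for row in group[1:]: ...
def pvWinner (g : List (List (String × String))) : List (String × String) :=
  match g with
  | [] => []  -- unreachable: every group built by the first pass is nonempty
  | best :: rest => rest.foldl (fun best row => if pvBetter row best then row else best) best

def normalize_statuses_alt (rows : List (List (String × String))) : List (List (String × String)) :=
  let groups := rows.foldl
    (fun d row => d.modify (pvKey row) [] (fun g => g ++ [row])) PySem.Dict.empty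
  groups.values.map pvWinner

-- ===== PRECONDITION & SPEC =====
def Spec_normalize_statuses (rows : List (List (String × String))) (out : List (List (String × String))) : Prop := out = normalize_statuses_alt rows
instance (rows : List (List (String × String))) (out : List (List (String × String))) : Decidable (Spec_normalize_statuses rows out) := by unfold Spec_normalize_statuses; infer_instance

-- ===== CLAIM (what is proved, stated in full; the proofs are below) =====
def Claim_equal_normalize_statuses : Prop := ∀ (rows : List (List (String × String))), Dom_normalize_statuses rows → Spec_normalize_statuses rows (normalize_statuses rows)

-- ===== LEMMAS AND PROOFS =====

-- pvWinner of a group extended by one row: compare the new row with the old winner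
lemma pvWinner_append (g : List (List (String × String))) (hg : g ≠ [])
    (r : List (String × String)) :
    pvWinner (g ++ [r]) = if pvBetter r (pvWinner g) then r else pvWinner g := by
  cases g with
  | nil => exact absurd rfl hg
  | cons b rest => simp [pvWinner, List.foldl_append]

-- A's loop body, characterised through pvBetter when the key is present
lemma pvStepA_some (d : PySem.Dict (String × String × String × String) (List (String × String)))
    (row cur : List (String × String)) (h : d.get? (pvKey row) = some cur) :
    pvStepA d row = if pvBetter row cur then d.insert (pvKey row) row else d := by
  simp only [pvStepA, h, pvBetter]
  by_cases h1 : pvPrio (pvGet row "status") > pvPrio (pvGet cur "status")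
  · simp [h1]
  · by_cases h2 : pvPrio (pvGet row "status") = pvPrio (pvGet cur "status")
    · by_cases h3 : pvGet cur "timestamp" ≤ pvGet row "timestamp" <;> simp [h2, h3]
    · simp [h1, h2]

-- the invariant carried through both folds: A's dict is B's groups dict with each
-- group replaced by its winner (and every group nonempty, keys without duplicates)
lemma pvMain (rows : List (List (String × String)))
    (dA : PySem.Dict (String × String × String × String) (List (String × String)))
    (dB : PySem.Dict (String × String × String × String) (List (List (String × String))))
    (hnd : dB.keys.Nodup)
    (hne : ∀ p ∈ dB.items, p.2 ≠ [])
    (hit : dA.items = dB.items.map (fun p => (p.1, pvWinner p.2))) :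
    (rows.foldl pvStepA dA).items =
      ((rows.foldl (fun d row => d.modify (pvKey row) [] (fun g => g ++ [row])) dB).items).map
        (fun p => (p.1, pvWinner p.2)) := by
  induction rows generalizing dA dB with
  | nil => simpa using hit
  | cons r rows ih =>
    have hkeys : dA.keys = dB.keys := by
      simp only [PySem.Dict.keys, hit, List.map_map]; rfl
    have hndA : dA.keys.Nodup := hkeys ▸ hnd
    simp only [List.foldl_cons]
    cases hg : dB.get? (pvKey r) with
    | none =>
      have hcB : dB.contains (pvKey r) = false := by
        rw [PySem.Dict.get?_eq_none_iff_contains _ _] at hg; simpa using hg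
      have hgA : dA.get? (pvKey r) = none := by
        rw [PySem.Dict.get?_eq_none_iff_not_mem_keys _ _] at hg ⊢
        rw [hkeys]; exact hg
      have hcA : dA.contains (pvKey r) = false := by
        rw [PySem.Dict.get?_eq_none_iff_contains _ _] at hgA; simpa using hgA
      have hstepA : pvStepA dA r = dA.insert (pvKey r) r := by
        simp only [pvStepA, hgA]
      have hstepB : dB.modify (pvKey r) [] (fun g => g ++ [r]) = dB.insert (pvKey r) [r] := by
        show dB.insert (pvKey r) (dB.getD (pvKey r) [] ++ [r]) = _
        rw [PySem.Dict.getD_of_get?_eq_none dB [] hg]; rfl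
      rw [hstepA, hstepB]
      apply ih
      · exact PySem.Dict.nodup_keys_insert _ _ _ hnd
      · intro p hp
        rcases (PySem.Dict.mem_items_insert _ _ _ _).1 hp with h | ⟨h, _⟩
        · subst h; simp
        · exact hne p h
      · rw [PySem.Dict.items_insert_of_not_contains _ _ hcA,
            PySem.Dict.items_insert_of_not_contains _ _ hcB]
        simp [hit, pvWinner]
    | some g =>
      have hmemB : (pvKey r, g) ∈ dB.items := PySem.Dict.mem_items_of_get?_eq_some dB hg
      have hgne : g ≠ [] := hne _ hmemB
      have hcB : dB.contains (pvKey r) = true := by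
        by_contra h
        have : dB.contains (pvKey r) = false := by simpa using h
        rw [← PySem.Dict.get?_eq_none_iff_contains _ _] at this
        rw [hg] at this; simp at this
      have hmemA : (pvKey r, pvWinner g) ∈ dA.items := by
        rw [hit]; exact List.mem_map.2 ⟨(pvKey r, g), hmemB, rfl⟩
      have hgA : dA.get? (pvKey r) = some (pvWinner g) :=
        PySem.Dict.get?_of_mem_items dA hmemA hndA
      have hcA : dA.contains (pvKey r) = true := by
        by_contra h
        have : dA.contains (pvKey r) = false := by simpa using h
        rw [← PySem.Dict.get?_eq_none_iff_contains _ _] at this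
        rw [hgA] at this; simp at this
      have hstepB : dB.modify (pvKey r) [] (fun g => g ++ [r]) = dB.insert (pvKey r) (g ++ [r]) := by
        show dB.insert (pvKey r) (dB.getD (pvKey r) [] ++ [r]) = _
        rw [PySem.Dict.getD_of_get?_eq_some dB [] hg]
      rw [pvStepA_some dA r (pvWinner g) hgA, hstepB]
      have hrepl : ∀ dA', dA'.items =
            ((dB.insert (pvKey r) (g ++ [r])).items).map (fun p => (p.1, pvWinner p.2)) →
          (rows.foldl pvStepA dA').items =
            ((rows.foldl (fun d row => d.modify (pvKey row) [] (fun g => g ++ [row]))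
              (dB.insert (pvKey r) (g ++ [r]))).items).map (fun p => (p.1, pvWinner p.2)) := by
        intro dA' hit'
        apply ih
        · exact PySem.Dict.nodup_keys_insert _ _ _ hnd
        · intro p hp
          rcases (PySem.Dict.mem_items_insert _ _ _ _).1 hp with h | ⟨h, _⟩
          · subst h; simp
          · exact hne p h
        · exact hit'
      -- items of B's insert, pushed through the winner map
      have hBmap : ((dB.insert (pvKey r) (g ++ [r])).items).map (fun p => (p.1, pvWinner p.2)) =
          dB.items.map (fun p =>
            if p.1 == pvKey r then (pvKey r, pvWinner (g ++ [r])) else (p.1, pvWinner p.2)) := by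
        rw [PySem.Dict.items_insert_of_contains _ _ hcB, List.map_map]
        apply List.map_congr_left
        intro p hp
        by_cases h : p.1 = pvKey r <;> simp [h]
      by_cases hb : pvBetter r (pvWinner g)
      · simp only [hb, if_pos]
        apply hrepl
        rw [hBmap, PySem.Dict.items_insert_of_contains _ _ hcA, hit, List.map_map]
        apply List.map_congr_left
        intro p hp
        by_cases h : p.1 = pvKey r
        · have hpg : p.2 = g := by
            have := PySem.Dict.get?_of_mem_items dB (k := p.1) (v := p.2) (by simpa using hp) hnd
            rw [h, hg] at this
            exact (Option.some.injEq _ _ ▸ this).symm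
          simp [h, pvWinner_append g hgne r, hb]
        · simp [h]
      · rw [if_neg hb]
        apply hrepl
        rw [hBmap, hit]
        apply List.map_congr_left
        intro p hp
        by_cases h : p.1 = pvKey r
        · have hpg : p.2 = g := by
            have := PySem.Dict.get?_of_mem_items dB (k := p.1) (v := p.2) (by simpa using hp) hnd
            rw [h, hg] at this
            exact (Option.some.injEq _ _ ▸ this).symm
          simp [h, hpg, pvWinner_append g hgne r, hb]
        · simp [h]

-- ===== VERDICT (by name: the statement is the Claim_ definition above) =====
theorem normalize_statuses_spec : Claim_equal_normalize_statuses := by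
  intro rows _
  show normalize_statuses rows = normalize_statuses_alt rows
  unfold normalize_statuses normalize_statuses_alt
  have h := pvMain rows PySem.Dict.empty PySem.Dict.empty PySem.Dict.nodup_keys_empty
    (by intro p hp; simp [PySem.Dict.empty] at hp) (by rfl)
  simp only [PySem.Dict.values, h, List.map_map]
  rfl
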